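-- pv_equiv track=rewrite | github.com/0000matteo0000/regenx | gen_pass.py | rgen
-- ===== SOURCE A (Python) =====
-- def rgen(options, i=0, generated="", generateds=None):
--     if i >= len(options):
--         if i > 0:
--             yield generated
--         return
--     if generateds is None:
--         generateds = []
--     generateds.append(None)
--     for o in options[i]:
--         if len(generateds) > 1 and generateds[-2] == "" and "" in options[i] and o != "":  # skip duplicated generations
--             continue
--         generateds[-1] = o
--         for r in rgen(options, i + 1, generated + o, generateds):
--             yield r
--     generateds.pop()
-- ===== SOURCE B (Python) =====
-- def rgen(options, i=0, generated="", generateds=None):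
--     # Iterative breadth-first frontier expansion instead of recursive DFS.
--     # Return-value equivalent; does not mutate `generateds` (A appends/pops it in place).
--     n = len(options)
--     if i >= n:
--         if i > 0:
--             yield generated
--         return
--     prev = generateds[-1] if generateds else None
--     frontier = [(generated, prev)]
--     for lvl in range(i, n):
--         opts = options[lvl]
--         has_empty = "" in opts
--         new_frontier = []
--         for acc, p in frontier:
--             for o in opts:
--                 if p == "" and has_empty and o != "":
--                     continue
--                 new_frontier.append((acc + o, o))
--         frontier = new_frontier
--     for acc, _ in frontier:
--         yield acc
-- ===== Notes on version B (the rewrite author's own statement) =====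
-- stated objective: alternative
-- what changed: Replaces the recursive DFS generator with mutated lookbehind list by an iterative level-by-level frontier expansion that carries only (accumulated string, previous choice) pairs.
import Mathlib
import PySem

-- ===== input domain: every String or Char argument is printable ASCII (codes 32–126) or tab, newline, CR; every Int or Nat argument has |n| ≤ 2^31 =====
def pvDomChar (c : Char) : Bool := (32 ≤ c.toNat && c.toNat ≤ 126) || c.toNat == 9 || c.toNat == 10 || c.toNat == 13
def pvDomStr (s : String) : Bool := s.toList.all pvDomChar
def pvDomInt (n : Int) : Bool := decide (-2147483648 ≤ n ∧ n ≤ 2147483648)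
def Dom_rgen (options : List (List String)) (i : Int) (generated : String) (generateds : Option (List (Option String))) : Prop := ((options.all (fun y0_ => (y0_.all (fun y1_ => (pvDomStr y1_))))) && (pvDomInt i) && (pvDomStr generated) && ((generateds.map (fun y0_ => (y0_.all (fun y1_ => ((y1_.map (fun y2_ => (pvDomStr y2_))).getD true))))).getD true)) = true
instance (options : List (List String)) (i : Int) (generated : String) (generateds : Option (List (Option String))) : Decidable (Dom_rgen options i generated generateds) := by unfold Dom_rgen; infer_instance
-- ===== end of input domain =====

-- B replaces A's recursive DFS generator (which mutates a lookbehind list in place; equivalence is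
-- about the yielded values only) by an iterative level-by-level frontier expansion: alternative decomposition.

-- ===== PORT A =====
-- recursive generator; `generateds` is passed by value (A appends then pops, restoring it, so the
-- list a recursive call receives is exactly `gs ++ [last choice]`); yields are accumulated in a list
def rgenAux (options : List (List String)) (i : Int) (generated : String) (gs : List (Option String)) : List String :=
  if (options.length : Int) ≤ i then
    (if 0 < i then [generated] else [])
  else
    match PySem.List.pyGet? options i with
    | none => []   -- Python raises IndexError here (i < -len(options)); excluded by Pre_rgen
    | some opts =>
      -- state: (the mutated list `generateds` after append, the yields so far)
      (opts.foldl (fun (st : List (Option String) × List String) o =>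
        if st.1.length > 1 ∧ PySem.List.pyGet? st.1 (-2) = some (some "") ∧ opts.contains "" = true ∧ o ≠ "" then st
        else
          let g' := st.1.dropLast ++ [some o]    -- generateds[-1] = o
          (g', st.2 ++ rgenAux options (i+1) (generated ++ o) g'))
        (gs ++ [none], [])).2
termination_by ((options.length : Int) - i).toNat
decreasing_by simp_wf; omega

def rgen (options : List (List String)) (i : Int) (generated : String) (generateds : Option (List (Option String))) : List String :=
  rgenAux options i generated (generateds.getD [])   -- `if generateds is None: generateds = []`

-- ===== PORT B =====
def rgen_alt (options : List (List String)) (i : Int) (generated : String) (generateds : Option (List (Option String))) : List String :=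
  let n : Int := options.length
  if n ≤ i then
    (if 0 < i then [generated] else [])
  else
    -- prev = generateds[-1] if generateds else None
    let prev : Option String :=
      match generateds with
      | some g => if g.isEmpty then none else g.getLast?.join
      | none => none
    let frontier := (PySem.List.pyRange i n 1).foldl
      (fun fr lvl =>
        let opts := (PySem.List.pyGet? options lvl).getD []
        let hasEmpty := opts.contains ""
        fr.foldl (fun nf (p : String × Option String) =>
          opts.foldl (fun nf o =>
            if p.2 = some "" ∧ hasEmpty = true ∧ o ≠ "" then nf
            else nf ++ [(p.1 ++ o, some o)]) nf) [])
      [(generated, prev)]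
    frontier.map Prod.fst

-- ===== PRECONDITION & SPEC =====
-- A raises IndexError (options[i] with i below -len(options)) exactly when i < -len(options); nothing else is excluded.
def Pre_rgen (options : List (List String)) (i : Int) (generated : String) (generateds : Option (List (Option String))) : Prop :=
  -(options.length : Int) ≤ i
instance (options : List (List String)) (i : Int) (generated : String) (generateds : Option (List (Option String))) : Decidable (Pre_rgen options i generated generateds) := by unfold Pre_rgen; infer_instance

def pvWitness_rgen : List (List String) × Int × String × Option (List (Option String)) :=
  ([["a", ""], ["b", "c"]], 0, "", none)

def Spec_rgen (options : List (List String)) (i : Int) (generated : String) (generateds : Option (List (Option String))) (out : List String) : Prop := out = rgen_alt options i generated generateds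
instance (options : List (List String)) (i : Int) (generated : String) (generateds : Option (List (Option String))) (out : List String) : Decidable (Spec_rgen options i generated generateds out) := by unfold Spec_rgen; infer_instance

-- ===== CLAIM (what is proved, stated in full; the proofs are below) =====
def Claim_equal_rgen : Prop := ∀ (options : List (List String)) (i : Int) (generated : String) (generateds : Option (List (Option String))), Dom_rgen options i generated generateds → Pre_rgen options i generated generateds → Spec_rgen options i generated generateds (rgen options i generated generateds)

-- ===== LEMMAS AND PROOFS =====

-- Reference function both ports are reduced to: A's recursion where the mutated list is
-- abstracted to the previous choice it is inspected through.
def refGen (options : List (List String)) (i : Int) (generated : String) (prev : Option String) : List String :=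
  if (options.length : Int) ≤ i then (if 0 < i then [generated] else [])
  else
    let opts := (PySem.List.pyGet? options i).getD []
    (opts.filter (fun o => decide ¬(prev = some "" ∧ opts.contains "" = true ∧ o ≠ ""))).flatMap
      (fun o => refGen options (i+1) (generated ++ o) (some o))
termination_by ((options.length : Int) - i).toNat
decreasing_by simp_wf; omega

-- A's skip condition, read through gs ++ [x], is exactly refGen's condition on prev = gs.getLast?.join
lemma cond_equiv (gs : List (Option String)) (x : Option String) (opts : List String) (o : String) :
    ((gs ++ [x]).length > 1 ∧ PySem.List.pyGet? (gs ++ [x]) (-2) = some (some "") ∧ opts.contains "" = true ∧ o ≠ "")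
    ↔ (gs.getLast?.join = some "" ∧ opts.contains "" = true ∧ o ≠ "") := by
  rcases eq_or_ne gs [] with rfl | hne
  · simp [PySem.List.pyGet?, PySem.List.pyIdx?]
  · have hlen : 2 ≤ (gs ++ [x]).length := by
      have := List.length_pos_iff.mpr hne; simp; omega
    rw [PySem.List.pyGet?_neg_ofNat _ 2 (by omega) hlen]
    have h1 : (gs ++ [x]).length - 2 = gs.length - 1 := by simp
    have h2 : (gs ++ [x])[gs.length - 1]? = gs[gs.length - 1]? := by
      rw [List.getElem?_append_left (by have := List.length_pos_iff.mpr hne; omega)]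
    have h3 : gs.getLast? = gs[gs.length - 1]? := List.getLast?_eq_getElem?
    rw [h1, h2, ← h3]
    have hl : 1 < (gs ++ [x]).length := by omega
    have hpos : 0 < gs.length := List.length_pos_iff.mpr hne
    cases hj : gs.getLast? with
    | none => simp
    | some v => cases v <;> simp [hpos]

-- A's inner loop, from any state whose list is gs ++ [x]
lemma loopA (options : List (List String)) (i : Int) (generated : String) (gs : List (Option String))
    (opts : List String) :
    ∀ (opts' : List String) (x : Option String) (acc : List String),
    (opts'.foldl (fun (st : List (Option String) × List String) o =>
        if st.1.length > 1 ∧ PySem.List.pyGet? st.1 (-2) = some (some "") ∧ opts.contains "" = true ∧ o ≠ "" then st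
        else
          let g' := st.1.dropLast ++ [some o]
          (g', st.2 ++ rgenAux options (i+1) (generated ++ o) g'))
        (gs ++ [x], acc)).2
      = acc ++ (opts'.filter (fun o => decide ¬(gs.getLast?.join = some "" ∧ opts.contains "" = true ∧ o ≠ ""))).flatMap
          (fun o => rgenAux options (i+1) (generated ++ o) (gs ++ [some o])) := by
  intro opts'
  induction opts' with
  | nil => intro x acc; simp
  | cons o rest ih =>
    intro x acc
    by_cases hc : (gs.getLast?.join = some "" ∧ opts.contains "" = true ∧ o ≠ "")
    · have hc' : ((gs ++ [x]).length > 1 ∧ PySem.List.pyGet? (gs ++ [x]) (-2) = some (some "") ∧ opts.contains "" = true ∧ o ≠ "") :=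
        (cond_equiv gs x opts o).mpr hc
      simp only [List.foldl_cons, if_pos hc', List.filter_cons]
      rw [ih x acc]
      obtain ⟨h1, h2, h3⟩ := hc
      have hm : ("" : String) ∈ opts := by simpa using h2
      simp [h1, hm, h3]
    · have hc' := (not_iff_not.mpr (cond_equiv gs x opts o)).mpr hc
      simp only [List.foldl_cons, if_neg hc', List.filter_cons]
      have hdrop : (gs ++ [x]).dropLast = gs := by simp
      rw [hdrop]
      rw [ih (some o) (acc ++ rgenAux options (i+1) (generated ++ o) (gs ++ [some o]))]
      have hd : (¬gs.getLast?.join = some "" ∨ "" ∉ opts ∨ o = "") := by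
        by_contra hcon; push Not at hcon
        exact hc ⟨hcon.1, by simpa using hcon.2.1, hcon.2.2⟩
      simp [hd]

-- Port A computes refGen of the last element of gs (flattened)
lemma rgenAux_eq_refGen (options : List (List String)) :
    ∀ (k : Nat) (i : Int) (generated : String) (gs : List (Option String)),
    ((options.length : Int) - i).toNat ≤ k →
    rgenAux options i generated gs = refGen options i generated gs.getLast?.join := by
  intro k
  induction k with
  | zero =>
    intro i generated gs hk
    have hge : (options.length : Int) ≤ i := by omega
    rw [rgenAux, refGen, if_pos hge, if_pos hge]
  | succ k ih =>
    intro i generated gs hk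
    by_cases hge : (options.length : Int) ≤ i
    · rw [rgenAux, refGen, if_pos hge, if_pos hge]
    · rw [rgenAux, refGen, if_neg hge, if_neg hge]
      cases hopts : PySem.List.pyGet? options i with
      | none =>
        simp [hopts]
      | some opts =>
        simp only [hopts, Option.getD_some]
        rw [loopA options i generated gs opts opts none []]
        simp only [List.nil_append]
        apply List.flatMap_congr
        intro o _
        rw [ih (i+1) (generated ++ o) (gs ++ [some o]) (by omega)]
        simp

-- B's one-level expansion is a flatMap of filtered children
lemma step_expand (options : List (List String)) (lvl : Int) (fr : List (String × Option String)) :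
    (fr.foldl (fun nf (p : String × Option String) =>
        ((PySem.List.pyGet? options lvl).getD []).foldl (fun nf o =>
          if p.2 = some "" ∧ ((PySem.List.pyGet? options lvl).getD []).contains "" = true ∧ o ≠ "" then nf
          else nf ++ [(p.1 ++ o, some o)]) nf) [])
    = fr.flatMap (fun p =>
        (((PySem.List.pyGet? options lvl).getD []).filter
            (fun o => decide ¬(p.2 = some "" ∧ ((PySem.List.pyGet? options lvl).getD []).contains "" = true ∧ o ≠ ""))).map
          (fun o => (p.1 ++ o, some o))) := by
  set opts := (PySem.List.pyGet? options lvl).getD [] with hopts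
  have inner : ∀ (p : String × Option String) (opts' : List String) (nf : List (String × Option String)),
      (opts'.foldl (fun nf o =>
          if p.2 = some "" ∧ opts.contains "" = true ∧ o ≠ "" then nf
          else nf ++ [(p.1 ++ o, some o)]) nf)
      = nf ++ (opts'.filter (fun o => decide ¬(p.2 = some "" ∧ opts.contains "" = true ∧ o ≠ ""))).map
          (fun o => (p.1 ++ o, some o)) := by
    intro p opts'
    induction opts' with
    | nil => intro nf; simp
    | cons o rest ih =>
      intro nf
      by_cases hc : (p.2 = some "" ∧ opts.contains "" = true ∧ o ≠ "")
      · simp only [List.foldl_cons, if_pos hc, List.filter_cons]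
        rw [ih]
        obtain ⟨h1, h2, h3⟩ := hc
        have hm : ("" : String) ∈ opts := by simpa using h2
        simp [h1, hm, h3]
      · simp only [List.foldl_cons, if_neg hc, List.filter_cons]
        rw [ih]
        have hd : (¬p.2 = some "" ∨ "" ∉ opts ∨ o = "") := by
          by_contra hcon; push Not at hcon
          exact hc ⟨hcon.1, by simpa using hcon.2.1, hcon.2.2⟩
        simp [hd]
  have outer : ∀ (acc : List (String × Option String)),
      (fr.foldl (fun nf p =>
          opts.foldl (fun nf o =>
            if p.2 = some "" ∧ opts.contains "" = true ∧ o ≠ "" then nf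
            else nf ++ [(p.1 ++ o, some o)]) nf) acc)
      = acc ++ fr.flatMap (fun p =>
          (opts.filter (fun o => decide ¬(p.2 = some "" ∧ opts.contains "" = true ∧ o ≠ ""))).map
            (fun o => (p.1 ++ o, some o))) := by
    intro acc
    induction fr generalizing acc with
    | nil => simp
    | cons p rest ih =>
      simp only [List.foldl_cons, List.flatMap_cons]
      rw [inner p opts acc, ih]
      simp
  simpa using outer []

lemma flatMap_singleton_fst (l : List (String × Option String)) :
    l.flatMap (fun p => [p.1]) = l.map Prod.fst := by
  induction l with
  | nil => rfl
  | cons a t ih => simp only [List.flatMap_cons, List.map_cons, List.singleton_append, ih]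

-- B's level fold computes refGen over every frontier element (for 0 < n)
lemma fold_levels (options : List (List String)) (hn : 0 < options.length) :
    ∀ (k : Nat) (i : Int) (fr : List (String × Option String)),
    ((options.length : Int) - i).toNat ≤ k → i ≤ (options.length : Int) →
    (((PySem.List.pyRange i (options.length : Int) 1).foldl
      (fun fr lvl =>
        let opts := (PySem.List.pyGet? options lvl).getD []
        let hasEmpty := opts.contains ""
        fr.foldl (fun nf (p : String × Option String) =>
          opts.foldl (fun nf o =>
            if p.2 = some "" ∧ hasEmpty = true ∧ o ≠ "" then nf
            else nf ++ [(p.1 ++ o, some o)]) nf) []) fr).map Prod.fst)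
    = fr.flatMap (fun p => refGen options i p.1 p.2) := by
  intro k
  induction k with
  | zero =>
    intro i fr hk hle
    have hi : i = (options.length : Int) := by omega
    subst hi
    rw [PySem.List.pyRange_one_eq_nil (by omega)]
    simp only [List.foldl_nil]
    have : ∀ p : String × Option String, refGen options (options.length : Int) p.1 p.2 = [p.1] := by
      intro p; rw [refGen, if_pos (by omega), if_pos (by exact_mod_cast hn)]
    simp only [this]
    exact (flatMap_singleton_fst fr).symm
  | succ k ih =>
    intro i fr hk hle
    rcases eq_or_lt_of_le hle with hi | hi
    · subst hi
      rw [PySem.List.pyRange_one_eq_nil (by omega)]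
      simp only [List.foldl_nil]
      have : ∀ p : String × Option String, refGen options (options.length : Int) p.1 p.2 = [p.1] := by
        intro p; rw [refGen, if_pos (by omega), if_pos (by exact_mod_cast hn)]
      simp only [this]
      exact (flatMap_singleton_fst fr).symm
    · rw [PySem.List.pyRange_one_cons hi]
      simp only [List.foldl_cons]
      rw [ih (i+1) _ (by omega) (by omega)]
      rw [step_expand options i fr]
      rw [List.flatMap_assoc]
      apply List.flatMap_congr
      intro p _
      rw [List.flatMap_map]
      simp only [Function.comp]
      rw [refGen, if_neg (by omega)]

-- B's initial prev equals A's gs.getLast?.join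
lemma prev_eq (generateds : Option (List (Option String))) :
    (match generateds with
      | some g => if g.isEmpty then none else g.getLast?.join
      | none => none)
    = (generateds.getD []).getLast?.join := by
  cases generateds with
  | none => simp
  | some g =>
    cases g with
    | nil => simp
    | cons a l => simp [List.isEmpty]

-- ===== VERDICT (by name: the statement is the Claim_ definition above) =====
theorem rgen_spec : Claim_equal_rgen := by
  intro options i generated generateds _ hpre
  unfold Spec_rgen rgen rgen_alt
  rw [rgenAux_eq_refGen options (((options.length : Int) - i).toNat) i generated _ le_rfl]
  by_cases hge : (options.length : Int) ≤ i
  · simp only [if_pos hge]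
    rw [refGen, if_pos hge]
  · simp only [if_neg hge]
    rw [prev_eq]
    have hn : 0 < options.length := by
      unfold Pre_rgen at hpre; omega
    rw [fold_levels options hn (((options.length : Int) - i).toNat) i _ le_rfl (by omega)]
    simp
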